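-- pv_equiv track=rewrite | github.com/THIAGONOMA/AgenticStoreUCP | backend/src/agents/nodes/discovery.py | _generate_search_variants
-- ===== SOURCE A (Python) =====
-- from typing import Dict, Any, List, Optional
--
-- def _generate_search_variants(message: str) -> List[str]:
--     """Gerar variantes de busca a partir da mensagem."""
--     # Limpar a mensagem
--     clean = message.lower().strip()
--
--     # Stop words expandidas
--     stop_words = {
--         "buscar", "procurar", "encontrar", "quero", "preciso", "gostaria",
--         "livro", "livros", "de", "sobre", "um", "uma", "o", "a", "os", "as",
--         "me", "mostre", "mostra", "tem", "voce", "algum", "alguns", "alguma",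
--         "por", "para", "com", "em", "no", "na", "nos", "nas", "do", "da",
--         "favor", "poderia", "pode", "consegue", "quer", "queria"
--     }
--
--     words = clean.split()
--     filtered = [w for w in words if w not in stop_words and len(w) > 2]
--
--     variants = []
--
--     # Adicionar palavras individuais
--     variants.extend(filtered)
--
--     # Adicionar combinacao de todas as palavras filtradas
--     if len(filtered) > 1:
--         variants.append(" ".join(filtered))
--
--     # Adicionar variantes com capitalizacao diferente
--     for word in filtered:
--         variants.append(word.capitalize())
--         variants.append(word.upper())
--
--     # Remover duplicatas mantendo ordem
--     seen = set()
--     unique = []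
--     for v in variants:
--         if v.lower() not in seen:
--             seen.add(v.lower())
--             unique.append(v)
--
--     return unique
-- ===== SOURCE B (Python) =====
-- from typing import List
--
-- def _generate_search_variants(message: str) -> List[str]:
--     """Variantes de busca: palavras filtradas (sem duplicatas, em ordem) + a juncao completa."""
--     stop_words = {
--         "buscar", "procurar", "encontrar", "quero", "preciso", "gostaria",
--         "livro", "livros", "de", "sobre", "um", "uma", "o", "a", "os", "as",
--         "me", "mostre", "mostra", "tem", "voce", "algum", "alguns", "alguma",
--         "por", "para", "com", "em", "no", "na", "nos", "nas", "do", "da",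
--         "favor", "poderia", "pode", "consegue", "quer", "queria"
--     }
--     filtered = [w for w in message.lower().strip().split()
--                 if w not in stop_words and len(w) > 2]
--     variants = list(dict.fromkeys(filtered))
--     if len(filtered) > 1:
--         variants.append(" ".join(filtered))
--     return variants
-- ===== Notes on version B (the rewrite author's own statement) =====
-- stated objective: simpler
-- what changed: B drops A's capitalize/upper variant-generation loop (dead: every such variant's lowercase key is already seen) and A's explicit seen-set dedup pass, deduplicating the filtered words directly with dict.fromkeys and appending the join of all filtered words afterwards.
import Mathlib
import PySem

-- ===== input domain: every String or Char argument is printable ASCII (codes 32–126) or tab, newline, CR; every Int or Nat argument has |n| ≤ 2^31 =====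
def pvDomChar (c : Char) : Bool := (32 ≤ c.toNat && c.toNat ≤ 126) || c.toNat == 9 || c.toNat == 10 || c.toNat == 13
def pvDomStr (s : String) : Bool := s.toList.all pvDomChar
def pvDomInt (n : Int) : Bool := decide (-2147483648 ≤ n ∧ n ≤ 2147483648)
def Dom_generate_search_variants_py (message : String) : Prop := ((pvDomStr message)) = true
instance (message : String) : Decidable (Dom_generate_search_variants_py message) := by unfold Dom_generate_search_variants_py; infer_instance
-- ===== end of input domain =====

-- B drops A's dead capitalize/upper variant generation and the explicit seen-set dedup loop
-- (dict.fromkeys dedups the filtered words; the join of all filtered words is appended after); objective: simpler.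

-- ===== PORT A =====
def pvStopWords : List String :=
  ["buscar", "procurar", "encontrar", "quero", "preciso", "gostaria",
   "livro", "livros", "de", "sobre", "um", "uma", "o", "a", "os", "as",
   "me", "mostre", "mostra", "tem", "voce", "algum", "alguns", "alguma",
   "por", "para", "com", "em", "no", "na", "nos", "nas", "do", "da",
   "favor", "poderia", "pode", "consegue", "quer", "queria"]

-- str.capitalize, ported by hand (exact on ASCII: first char uppercased, the rest lowercased)
def pyCapitalize (s : String) : String :=
  match s.toList with
  | [] => ""
  | c :: cs => String.mk (PySem.Chars.upperChar c :: PySem.Chars.lower cs)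

def generate_search_variants_py (message : String) : List String :=
  let clean := PySem.Str.strip (PySem.Str.lower message)
  let stop_words : PySem.Set String := PySem.Set.ofList pvStopWords
  let words := PySem.Str.split₀ clean
  let filtered := words.filter (fun w => !(PySem.Set.contains stop_words w) && decide (2 < PySem.Str.len w))
  let variants : List String := []
  let variants := variants ++ filtered
  let variants := if 1 < filtered.length then variants ++ [PySem.Str.join " " filtered] else variants
  let variants := filtered.foldl (fun acc word => acc ++ [pyCapitalize word, PySem.Str.upper word]) variants
  let p := variants.foldl (fun (p : PySem.Set String × List String) v =>
      if PySem.Set.contains p.1 (PySem.Str.lower v) then p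
      else (PySem.Set.add p.1 (PySem.Str.lower v), p.2 ++ [v])) (PySem.Set.empty, [])
  p.2

-- ===== PORT B =====
def generate_search_variants_py_alt (message : String) : List String :=
  let filtered := (PySem.Str.split₀ (PySem.Str.strip (PySem.Str.lower message))).filter
      (fun w => !(PySem.Set.contains (PySem.Set.ofList pvStopWords) w) && decide (2 < PySem.Str.len w))
  let variants := PySem.List.dedup filtered
  if 1 < filtered.length then variants ++ [PySem.Str.join " " filtered] else variants

-- ===== PRECONDITION & SPEC =====
def Spec_generate_search_variants_py (message : String) (out : List String) : Prop := out = generate_search_variants_py_alt message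
instance (message : String) (out : List String) : Decidable (Spec_generate_search_variants_py message out) := by unfold Spec_generate_search_variants_py; infer_instance

-- ===== CLAIM (what is proved, stated in full; the proofs are below) =====
def Claim_equal_generate_search_variants_py : Prop := ∀ (message : String), Dom_generate_search_variants_py message → Spec_generate_search_variants_py message (generate_search_variants_py message)

-- ===== LEMMAS AND PROOFS =====
theorem toNat_ofNat_valid (n : Nat) (h : n < 55296) : (Char.ofNat n).toNat = n := by
  simp [Char.ofNat, Nat.isValidChar, h]

theorem char_le_iff {c d : Char} : c ≤ d ↔ c.toNat ≤ d.toNat := ⟨Fin.mk_le_mk.mp, Fin.mk_le_mk.mpr⟩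

theorem lc_uc (c : Char) : PySem.Chars.lowerChar (PySem.Chars.upperChar c) = PySem.Chars.lowerChar c := by
  have eA : 'A'.toNat = 65 := rfl
  have eZ : 'Z'.toNat = 90 := rfl
  unfold PySem.Chars.upperChar PySem.Chars.lowerChar PySem.Chars.islower PySem.Chars.isupper
  by_cases h : 'a' ≤ c ∧ c ≤ 'z'
  · have h1 : 97 ≤ c.toNat := char_le_iff.mp h.1
    have h2 : c.toNat ≤ 122 := char_le_iff.mp h.2
    have hv : (Char.ofNat (c.toNat - 32)).toNat = c.toNat - 32 := toNat_ofNat_valid _ (by omega)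
    have hA : 'A' ≤ Char.ofNat (c.toNat - 32) := char_le_iff.mpr (by rw [hv]; omega)
    have hZ : Char.ofNat (c.toNat - 32) ≤ 'Z' := char_le_iff.mpr (by rw [hv]; omega)
    have hnZ : ¬ c ≤ 'Z' := by intro hc; have := char_le_iff.mp hc; omega
    have hres : Char.ofNat ((Char.ofNat (c.toNat - 32)).toNat + 32) = c := by
      rw [hv]; rw [Nat.sub_add_cancel (by omega)]; exact Char.ofNat_toNat c
    simp [h.1, h.2, hA, hZ, hnZ, hres]
  · have h' : ¬ ('a' ≤ c ∧ c ≤ 'z') := h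
    simp [h']

theorem lc_lc (c : Char) : PySem.Chars.lowerChar (PySem.Chars.lowerChar c) = PySem.Chars.lowerChar c := by
  unfold PySem.Chars.lowerChar PySem.Chars.isupper
  by_cases h : 'A' ≤ c ∧ c ≤ 'Z'
  · have h1 : 65 ≤ c.toNat := char_le_iff.mp h.1
    have h2 : c.toNat ≤ 90 := char_le_iff.mp h.2
    have hv : (Char.ofNat (c.toNat + 32)).toNat = c.toNat + 32 := toNat_ofNat_valid _ (by omega)
    have hh : ¬ Char.ofNat (c.toNat + 32) ≤ 'Z' := by
      intro hc; have := char_le_iff.mp hc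
      rw [hv] at this; rw [show 'Z'.toNat = 90 from rfl] at this; omega
    simp [h.1, h.2, hh]
  · simp [h]

-- chars of every token produced by split₀.go satisfy any predicate holding on acc, cur and the remaining input
theorem split₀_go_chars (p : Char → Prop) : ∀ (s cur : List Char) (acc : List (List Char)),
    (∀ w ∈ acc, ∀ c ∈ w, p c) → (∀ c ∈ cur, p c) → (∀ c ∈ s, p c) →
    ∀ w ∈ PySem.Chars.split₀.go s cur acc, ∀ c ∈ w, p c := by
  intro s
  induction s with
  | nil =>
    intro cur acc hacc hcur _ w hw
    unfold PySem.Chars.split₀.go at hw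
    by_cases hc : cur.isEmpty
    · simp [hc] at hw
      exact hacc w hw
    · simp [hc] at hw
      rcases hw with hw | hw
      · intro c hcw; exact hacc w hw c hcw
      · intro c hcw; rw [hw] at hcw; simp at hcw; exact hcur c hcw
  | cons a s ih =>
    intro cur acc hacc hcur hs w hw
    unfold PySem.Chars.split₀.go at hw
    by_cases ha : PySem.Chars.isspace a
    · by_cases hc : cur.isEmpty
      · simp [ha, hc] at hw
        exact ih [] acc hacc (by simp) (fun c hcs => hs c (by simp [hcs])) w hw
      · simp [ha, hc] at hw
        refine ih [] (cur.reverse :: acc) ?_ (by simp) (fun c hcs => hs c (by simp [hcs])) w hw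
        intro w' hw'; rcases List.mem_cons.mp hw' with hw' | hw'
        · intro c hcw; rw [hw'] at hcw; simp at hcw; exact hcur c hcw
        · exact hacc w' hw'
    · simp [ha] at hw
      refine ih (a :: cur) acc hacc ?_ (fun c hcs => hs c (by simp [hcs])) w hw
      intro c hcc; rcases List.mem_cons.mp hcc with h | h
      · rw [h]; exact hs a (by simp)
      · exact hcur c h

-- tokens of split₀.go contain no whitespace character
theorem split₀_go_nonspace : ∀ (s cur : List Char) (acc : List (List Char)),
    (∀ w ∈ acc, ∀ c ∈ w, PySem.Chars.isspace c = false) → (∀ c ∈ cur, PySem.Chars.isspace c = false) →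
    ∀ w ∈ PySem.Chars.split₀.go s cur acc, ∀ c ∈ w, PySem.Chars.isspace c = false := by
  intro s
  induction s with
  | nil =>
    intro cur acc hacc hcur w hw
    unfold PySem.Chars.split₀.go at hw
    by_cases hc : cur.isEmpty
    · simp [hc] at hw; exact hacc w hw
    · simp [hc] at hw
      rcases hw with hw | hw
      · exact hacc w hw
      · intro c hcw; rw [hw] at hcw; simp at hcw; exact hcur c hcw
  | cons a s ih =>
    intro cur acc hacc hcur w hw
    unfold PySem.Chars.split₀.go at hw
    by_cases ha : PySem.Chars.isspace a
    · by_cases hc : cur.isEmpty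
      · simp [ha, hc] at hw
        exact ih [] acc hacc (by simp) w hw
      · simp [ha, hc] at hw
        refine ih [] (cur.reverse :: acc) ?_ (by simp) w hw
        intro w' hw'; rcases List.mem_cons.mp hw' with hw' | hw'
        · intro c hcw; rw [hw'] at hcw; simp at hcw; exact hcur c hcw
        · exact hacc w' hw'
    · simp [ha] at hw
      refine ih (a :: cur) acc hacc ?_ w hw
      intro c hcc; rcases List.mem_cons.mp hcc with h | h
      · rw [h]; exact eq_false_of_ne_true ha
      · exact hcur c h

-- every token of A's/B's word list is lowercase-fixed and whitespace-free
theorem token_facts (message : String) (w : String)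
    (hw : w ∈ PySem.Str.split₀ (PySem.Str.strip (PySem.Str.lower message))) :
    (∀ c ∈ w.toList, PySem.Chars.lowerChar c = c) ∧ (∀ c ∈ w.toList, PySem.Chars.isspace c = false) := by
  have hmem : w.toList ∈ PySem.Chars.split₀ (PySem.Str.strip (PySem.Str.lower message)).toList := by
    rw [← PySem.Str.split₀_map_toList]
    exact List.mem_map_of_mem hw
  have hlc : ∀ c ∈ (PySem.Str.strip (PySem.Str.lower message)).toList, PySem.Chars.lowerChar c = c := by
    intro c hc
    rw [PySem.Str.toList_strip, PySem.Str.toList_lower] at hc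
    have hc1 : c ∈ PySem.Chars.lstrip (PySem.Chars.lower message.toList) := by
      unfold PySem.Chars.strip PySem.Chars.rstrip at hc
      rw [List.mem_reverse] at hc
      have := (List.dropWhile_sublist _).mem hc
      rwa [List.mem_reverse] at this
    have hc2 : c ∈ PySem.Chars.lower message.toList := (List.dropWhile_sublist _).mem hc1
    unfold PySem.Chars.lower at hc2
    obtain ⟨d, _, hd⟩ := List.mem_map.mp hc2
    rw [← hd]; exact lc_lc d
  constructor
  · exact split₀_go_chars (fun c => PySem.Chars.lowerChar c = c) _ [] [] (by simp) (by simp) hlc w.toList hmem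
  · exact split₀_go_nonspace _ [] [] (by simp) (by simp) w.toList hmem

theorem lower_fixed_of_chars (w : String) (h : ∀ c ∈ w.toList, PySem.Chars.lowerChar c = c) :
    PySem.Str.lower w = w := by
  apply String.toList_inj.mp
  rw [PySem.Str.toList_lower]
  unfold PySem.Chars.lower
  rw [List.map_congr_left h]; simp

theorem lower_cap (w : String) (h : ∀ c ∈ w.toList, PySem.Chars.lowerChar c = c) :
    PySem.Str.lower (pyCapitalize w) = w := by
  apply String.toList_inj.mp
  rw [PySem.Str.toList_lower]
  unfold pyCapitalize
  cases hw : w.toList with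
  | nil =>
    simp [PySem.Chars.lower]
  | cons c cs =>
    have h1 : PySem.Chars.lowerChar c = c := h c (by simp [hw])
    have h2 : ∀ d ∈ cs, PySem.Chars.lowerChar d = d := fun d hd => h d (by simp [hw, hd])
    have hmk : (String.mk (PySem.Chars.upperChar c :: PySem.Chars.lower cs)).toList
        = PySem.Chars.upperChar c :: PySem.Chars.lower cs :=
      Eq.symm (String.ofList_eq.mp rfl)
    rw [hmk]
    simp only [PySem.Chars.lower, List.map_cons, List.map_map, lc_uc, h1]
    congr 1
    rw [List.map_congr_left (fun d hd => by
      simp only [Function.comp_apply, lc_lc]; exact h2 d hd)]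
    simp

theorem lower_upper (w : String) (h : ∀ c ∈ w.toList, PySem.Chars.lowerChar c = c) :
    PySem.Str.lower (PySem.Str.upper w) = w := by
  apply String.toList_inj.mp
  rw [PySem.Str.toList_lower, PySem.Str.toList_upper]
  unfold PySem.Chars.lower PySem.Chars.upper
  rw [List.map_map]
  have : ∀ c ∈ w.toList, (PySem.Chars.lowerChar ∘ PySem.Chars.upperChar) c = c := by
    intro c hc; simp only [Function.comp_apply, lc_uc]; exact h c hc
  rw [List.map_congr_left this]; simp

theorem mem_intercalate {sep : List Char} : ∀ {xss : List (List Char)} {c : Char},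
    c ∈ List.intercalate sep xss → c ∈ sep ∨ ∃ xs ∈ xss, c ∈ xs := by
  intro xss
  induction xss with
  | nil => intro c hc; simp [List.intercalate] at hc
  | cons a t ih =>
    intro c hc
    cases t with
    | nil =>
      simp [List.intercalate] at hc
      exact Or.inr ⟨a, by simp, hc⟩
    | cons b t' =>
      rw [show List.intercalate sep (a::b::t') = a ++ sep ++ List.intercalate sep (b::t') by
        simp [List.intercalate]] at hc
      simp only [List.mem_append] at hc
      rcases hc with (hc | hc) | hc
      · exact Or.inr ⟨a, by simp, hc⟩
      · exact Or.inl hc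
      · rcases ih hc with h | ⟨xs, hxs, hcx⟩
        · exact Or.inl h
        · exact Or.inr ⟨xs, by simp [hxs], hcx⟩

theorem join_chars (parts : List String) (P : Char → Prop) (hsep : P ' ')
    (h : ∀ p ∈ parts, ∀ c ∈ p.toList, P c) :
    ∀ c ∈ (PySem.Str.join " " parts).toList, P c := by
  intro c hc
  rw [PySem.Str.toList_join] at hc
  have hsepl : (" " : String).toList = [' '] := rfl
  unfold PySem.Chars.join at hc
  rw [hsepl] at hc
  rcases mem_intercalate hc with h1 | ⟨xs, hxs, hcx⟩
  · simp at h1; rw [h1]; exact hsep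
  · obtain ⟨p, hp, rfl⟩ := List.mem_map.mp hxs
    exact h p hp c hcx

theorem space_mem_join (a b : String) (t : List String) :
    ' ' ∈ (PySem.Str.join " " (a :: b :: t)).toList := by
  rw [PySem.Str.toList_join]
  unfold PySem.Chars.join
  rw [show (" " : String).toList = [' '] from rfl]
  rw [List.map_cons, List.map_cons]
  rw [show List.intercalate [' '] (a.toList :: b.toList :: List.map String.toList t)
        = a.toList ++ [' '] ++ List.intercalate [' '] (b.toList :: List.map String.toList t) by
    simp [List.intercalate]]
  simp

-- the body of A's dedup loop
def pvDStep (p : PySem.Set String × List String) (v : String) : PySem.Set String × List String :=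
  if PySem.Set.contains p.1 (PySem.Str.lower v) then p
  else (PySem.Set.add p.1 (PySem.Str.lower v), p.2 ++ [v])

theorem set_contains_iff (s : PySem.Set String) (x : String) :
    PySem.Set.contains s x = true ↔ x ∈ s := by
  simp [PySem.Set.contains]

-- over lowercase-fixed elements with equal components, A's dedup loop is Set.update on both components
theorem dstep_run : ∀ (vs : List String), (∀ v ∈ vs, PySem.Str.lower v = v) →
    ∀ s : PySem.Set String,
      vs.foldl pvDStep (s, s) = (PySem.Set.update s vs, PySem.Set.update s vs) := by
  intro vs
  induction vs with
  | nil => intro _ s; simp [PySem.Set.update]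
  | cons v t ih =>
    intro h s
    have hv : PySem.Str.lower v = v := h v (by simp)
    have hstep : pvDStep (s, s) v = (PySem.Set.add s v, PySem.Set.add s v) := by
      unfold pvDStep PySem.Set.add
      rw [hv]
      by_cases hc : v ∈ s
      · simp [hc]
      · have hcf : PySem.Set.contains s v = false := by
          rw [← Bool.not_eq_true]; simpa [set_contains_iff] using hc
        simp [hc]
    rw [List.foldl_cons, hstep, ih (fun w hw => h w (by simp [hw]))]
    simp [PySem.Set.update]

-- elements whose lowercase key is already seen leave the loop state unchanged
theorem dstep_skip : ∀ (vs : List String) (p : PySem.Set String × List String),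
    (∀ v ∈ vs, PySem.Str.lower v ∈ p.1) → vs.foldl pvDStep p = p := by
  intro vs
  induction vs with
  | nil => intro p _; simp
  | cons v t ih =>
    intro p h
    have hstep : pvDStep p v = p := by
      unfold pvDStep
      rw [if_pos ((set_contains_iff _ _).mpr (h v (by simp)))]
    rw [List.foldl_cons, hstep]
    exact ih p (fun w hw => h w (by simp [hw]))

set_option maxHeartbeats 1000000 in
theorem main_eq (message : String) :
    generate_search_variants_py message = generate_search_variants_py_alt message := by
  unfold generate_search_variants_py generate_search_variants_py_alt
  simp only []
  set F := (PySem.Str.split₀ (PySem.Str.strip (PySem.Str.lower message))).filter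
      (fun w => !(PySem.Set.contains (PySem.Set.ofList pvStopWords) w) && decide (2 < PySem.Str.len w)) with hFdef
  have hFmem : ∀ w ∈ F, w ∈ PySem.Str.split₀ (PySem.Str.strip (PySem.Str.lower message)) := by
    intro w hw; rw [hFdef] at hw; exact List.mem_of_mem_filter hw
  clear_value F
  have hlow : ∀ w ∈ F, ∀ c ∈ w.toList, PySem.Chars.lowerChar c = c :=
    fun w hw => (token_facts message w (hFmem w hw)).1
  have hnos : ∀ w ∈ F, ∀ c ∈ w.toList, PySem.Chars.isspace c = false :=
    fun w hw => (token_facts message w (hFmem w hw)).2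
  have hlowF : ∀ w ∈ F, PySem.Str.lower w = w :=
    fun w hw => lower_fixed_of_chars w (hlow w hw)
  rw [show (fun (p : PySem.Set String × List String) v =>
      if PySem.Set.contains p.1 (PySem.Str.lower v) then p
      else (PySem.Set.add p.1 (PySem.Str.lower v), p.2 ++ [v])) = pvDStep from rfl]
  have hcaps : ∀ (init : List String), List.foldl (fun acc word => acc ++ [pyCapitalize word, PySem.Str.upper word]) init F
      = init ++ F.flatMap (fun word => [pyCapitalize word, PySem.Str.upper word]) :=
    fun init => PySem.List.foldl_append_eq_flatMap _ F init
  rw [hcaps]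
  simp only [List.nil_append]
  have hrun : List.foldl pvDStep (PySem.Set.empty, []) F =
      (PySem.Set.ofList F, PySem.Set.ofList F) := by
    rw [show ((PySem.Set.empty, []) : PySem.Set String × List String)
        = (([] : PySem.Set String), ([] : List String)) from rfl]
    rw [dstep_run F hlowF []]
    rw [PySem.Set.ofList_eq_foldl]
    rfl
  have hskip : ∀ (p : PySem.Set String × List String), (∀ w ∈ F, w ∈ p.1) →
      List.foldl pvDStep p (F.flatMap (fun word => [pyCapitalize word, PySem.Str.upper word])) = p := by
    intro p hp
    apply dstep_skip
    intro v hv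
    obtain ⟨w, hw, hvw⟩ := List.mem_flatMap.mp hv
    rcases List.mem_cons.mp hvw with rfl | hvw'
    · rw [lower_cap w (hlow w hw)]; exact hp w hw
    · rcases List.mem_cons.mp hvw' with rfl | h0
      · rw [lower_upper w (hlow w hw)]; exact hp w hw
      · simp at h0
  by_cases hlen : 1 < F.length
  · simp only [if_pos hlen]
    have hspace : ' ' ∈ (PySem.Str.join " " F).toList := by
      obtain ⟨a, t1, h1⟩ := List.exists_cons_of_ne_nil (l := F)
        (by intro h; rw [h] at hlen; simp at hlen)
      obtain ⟨b, t, h2⟩ := List.exists_cons_of_ne_nil (l := t1)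
        (by intro h; rw [h] at h1; rw [h1] at hlen; simp at hlen)
      rw [h1, h2]
      exact space_mem_join a b t
    have hJnotF : PySem.Str.join " " F ∉ PySem.Set.ofList F := by
      intro hmem
      have hJF : PySem.Str.join " " F ∈ F := (PySem.Set.mem_ofList F _).mp hmem
      have := hnos _ hJF ' ' hspace
      exact absurd this (by decide)
    have hlowJ : PySem.Str.lower (PySem.Str.join " " F) = PySem.Str.join " " F :=
      lower_fixed_of_chars _ (join_chars F (fun c => PySem.Chars.lowerChar c = c)
        (by decide) hlow)
    rw [List.foldl_append, List.foldl_append, hrun]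
    have hJstep : List.foldl pvDStep (PySem.Set.ofList F, PySem.Set.ofList F) [PySem.Str.join " " F] =
        (PySem.Set.ofList F ++ [PySem.Str.join " " F], PySem.Set.ofList F ++ [PySem.Str.join " " F]) := by
      rw [dstep_run [PySem.Str.join " " F] (by intro v hv; simp at hv; rw [hv]; exact hlowJ) (PySem.Set.ofList F)]
      have hadd : PySem.Set.add (PySem.Set.ofList F) (PySem.Str.join " " F)
          = PySem.Set.ofList F ++ [PySem.Str.join " " F] := by
        unfold PySem.Set.add
        rw [if_neg]
        intro hc
        exact hJnotF ((set_contains_iff _ _).mp hc)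
      simp [PySem.Set.update, hadd]
    rw [hJstep, hskip _ (by
      intro w hw
      exact List.mem_append_left _ ((PySem.Set.mem_ofList F w).mpr hw))]
    simp [PySem.List.dedup_eq_ofList]
  · simp only [if_neg hlen]
    rw [List.foldl_append, hrun]
    rw [hskip _ (fun w hw => (PySem.Set.mem_ofList F w).mpr hw)]
    simp [PySem.List.dedup_eq_ofList]

-- ===== VERDICT (by name: the statement is the Claim_ definition above) =====
theorem generate_search_variants_py_spec : Claim_equal_generate_search_variants_py := by
  intro message _
  unfold Spec_generate_search_variants_py
  exact main_eq message
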